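-- pv_equiv track=rewrite | github.com/MarketDataApp/sdk-go | .scripts/process_markdown.py | add_anchor_tags
-- ===== SOURCE A (Python) =====
-- def add_anchor_tags(content, sections_to_process):
--     """Process the parameters block of text as specified, including 'Setter Methods' and 'Execution Methods'.
--     Insert <a href="#"> before and </a> after lines that start with a dash (-)."""
--     lines = content.split('\n')
--     processed_lines = []
--     processing = False
--     found_first_dash = False  # Variable to track the first dash
--
--     for line in lines:
--         if (match := line.strip()) in sections_to_process:
--             processing = True
--             matched_string = match  # Keep track of which string matched
--             found_first_dash = False  # Reset for each new section
--             processed_lines.append(line)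
--             continue
--         if processing:
--             if not found_first_dash:
--                 if line.strip() == '':
--                     processed_lines.append(line)
--                     continue
--                 elif not line.lstrip().startswith('-'):
--                     processed_lines.append(line)
--                     continue
--                 else:
--                     found_first_dash = True  # Found the first dash, start processing lines
--             if line.startswith('-'):
--                 if matched_string != '#### Generated By':
--                     previous_lines = lines[:lines.index(line)]
--                     type_word = ""
--                     for prev_line in reversed(previous_lines):
--                         if prev_line.strip().startswith("type "):
--                             type_word = prev_line.split()[1]
--                             break
--                     anchor = line[line.find('`')+1:line.find('(')].strip()
--                     # Insert <a href="#"> before and </a> after the line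
--                     processed_lines.append('- ' + f'<a href="#{type_word}.{anchor}">' +'`' + line[3:] + '</a>')
--                 else:
--                     anchor = line[line.find('`')+1:line.find('(')].strip()
--                     # Insert <a href="#"> before and </a> after the line
--                     processed_lines.append('- ' + f'<a href="#{anchor}">' +'`' + line[3:] + '</a>')
--             elif line.strip() == '' or line.startswith('  '):
--                 processed_lines.append(line)
--                 continue
--             else:
--                 # Stop processing if the line does not start with a dash
--                 processing = False
--                 processed_lines.append(line)
--         else:
--             processed_lines.append(line)
--
--     return '\n'.join(processed_lines)
-- ===== SOURCE B (Python) =====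
-- def add_anchor_tags(content, sections_to_process):
--     """Process the parameters block: wrap dash-prefixed lines of the named sections in anchor
--     tags.  The per-dash-line backward scans (lines.index + reversed search for a 'type ' line)
--     are replaced by a precomputed first-occurrence index and a prefix array of the nearest
--     preceding type word, consulted by a single state-machine pass."""
--     lines = content.split('\n')
--     n = len(lines)
--
--     # Precompute: first occurrence index of each line, and for each index i the word
--     # following 'type ' on the nearest line before i whose strip starts with 'type '.
--     first_idx = {}
--     type_before = [""] * n
--     cur = ""
--     for i, ln in enumerate(lines):
--         if ln not in first_idx:
--             first_idx[ln] = i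
--         type_before[i] = cur
--         if ln.strip().startswith("type "):
--             cur = ln.split()[1]
--
--     out = []
--     state = 0  # 0 = idle, 1 = in section before first dash, 2 = wrapping dash lines
--     section = ""
--     for ln in lines:
--         s = ln.strip()
--         if s in sections_to_process:
--             state, section = 1, s
--             out.append(ln)
--             continue
--         if state == 1:
--             if s == '' or not ln.lstrip().startswith('-'):
--                 out.append(ln)
--                 continue
--             state = 2
--         if state == 2:
--             if ln.startswith('-'):
--                 anchor = ln[ln.find('`') + 1:ln.find('(')].strip()
--                 if section != '#### Generated By':
--                     tag = '<a href="#{}.{}">'.format(type_before[first_idx[ln]], anchor)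
--                 else:
--                     tag = '<a href="#{}">'.format(anchor)
--                 out.append('- ' + tag + '`' + ln[3:] + '</a>')
--             elif s == '' or ln.startswith('  '):
--                 out.append(ln)
--             else:
--                 state = 0
--                 out.append(ln)
--         else:
--             out.append(ln)
--     return '\n'.join(out)
-- ===== Notes on version B (the rewrite author's own statement) =====
-- stated objective: alternative
-- what changed: Replaces A's per-dash-line rescans (lines.index(line) plus a reversed scan of all preceding lines for a 'type ' line) with a precomputation pass building a first-occurrence index dict and a prefix array of the nearest preceding type word, then one linear pass with an explicit 0/1/2 state machine.
import Mathlib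
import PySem

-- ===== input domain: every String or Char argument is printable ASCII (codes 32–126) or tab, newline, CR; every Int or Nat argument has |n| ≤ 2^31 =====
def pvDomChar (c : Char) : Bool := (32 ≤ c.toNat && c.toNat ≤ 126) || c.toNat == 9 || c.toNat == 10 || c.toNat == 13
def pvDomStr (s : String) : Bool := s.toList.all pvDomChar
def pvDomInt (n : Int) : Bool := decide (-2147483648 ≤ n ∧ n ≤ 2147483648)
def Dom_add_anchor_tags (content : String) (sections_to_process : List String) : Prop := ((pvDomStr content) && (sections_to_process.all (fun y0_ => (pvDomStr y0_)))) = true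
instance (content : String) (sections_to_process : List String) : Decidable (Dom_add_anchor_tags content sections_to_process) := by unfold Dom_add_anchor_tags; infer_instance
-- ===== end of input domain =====

-- B replaces A's per-dash-line backward scans (lines.index + reversed search for a "type " line)
-- by a precomputed first-occurrence index and a prefix array of nearest preceding type words,
-- and runs one explicit 0/1/2 state machine over the lines.

-- ===== PORT A =====

-- shared primitive: `line.split()[1]` (both Pythons contain this very expression);
-- the none branch is unreachable at its call sites (the line strips to "type " + a word)
def pvSplitSecond (ln : String) : String :=
  match PySem.List.pyGet? (PySem.Str.split₀ ln) 1 with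
  | some w => w
  | none => ""

-- A's inner loop `for prev_line in reversed(previous_lines): ...` applied to the already-reversed list
def pvTypeScan : List String → String
  | [] => ""
  | p :: rest =>
    if PySem.Str.startswith (PySem.Str.strip p) "type " then pvSplitSecond p
    else pvTypeScan rest

-- A's type_word computation: previous_lines = lines[:lines.index(line)], then the reversed scan
def pvTypeWordA (lines : List String) (ln : String) : String :=
  match PySem.List.index? lines ln with
  | some i => pvTypeScan (PySem.List.slice lines none (some (i : Int))).reverse
  | none => ""  -- unreachable: ln is an element of lines

-- anchor = line[line.find('`')+1:line.find('(')].strip()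
def pvAnchor (ln : String) : String :=
  PySem.Str.strip (PySem.Str.slice ln (some (PySem.Str.find ln "`" + 1)) (some (PySem.Str.find ln "(")))

-- A's wrapped dash line (both branches of `if matched_string != '#### Generated By'`)
def pvWrapA (lines : List String) (matched ln : String) : String :=
  if matched ≠ "#### Generated By" then
    "- " ++ ("<a href=\"#" ++ pvTypeWordA lines ln ++ "." ++ pvAnchor ln ++ "\">")
      ++ "`" ++ PySem.Str.slice ln (some 3) none ++ "</a>"
  else
    "- " ++ ("<a href=\"#" ++ pvAnchor ln ++ "\">")
      ++ "`" ++ PySem.Str.slice ln (some 3) none ++ "</a>"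

-- A's loop body; state = (processed_lines, processing, found_first_dash, matched_string)
def pvStepA (lines secs : List String) (st : List String × Bool × Bool × String) (ln : String) :
    List String × Bool × Bool × String :=
  let (out, processing, ffd, matched) := st
  let m := PySem.Str.strip ln
  if secs.contains m then (out ++ [ln], true, false, m)
  else if processing then
    if ¬ffd ∧ m = "" then (out ++ [ln], true, ffd, matched)
    else if ¬ffd ∧ ¬ PySem.Str.startswith (PySem.Str.lstrip ln) "-" then (out ++ [ln], true, ffd, matched)
    else  -- found_first_dash is now true
      if PySem.Str.startswith ln "-" then (out ++ [pvWrapA lines matched ln], true, true, matched)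
      else if m = "" ∨ PySem.Str.startswith ln "  " then (out ++ [ln], true, true, matched)
      else (out ++ [ln], false, true, matched)
  else (out ++ [ln], processing, ffd, matched)

def add_anchor_tags (content : String) (sections_to_process : List String) : String :=
  let lines := (PySem.Str.split? content "\n").getD []
  let fin := lines.foldl (pvStepA lines sections_to_process) ([], false, false, "")
  PySem.Str.join "\n" fin.1

-- ===== PORT B =====

-- B's precomputation pass: first-occurrence dict and prefix array of nearest preceding type word
def pvPreStep (st : PySem.Dict String Nat × List String × String × Nat) (ln : String) :
    PySem.Dict String Nat × List String × String × Nat :=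
  let (d, tb, cur, i) := st
  let d := if (PySem.Dict.get? d ln).isSome then d else PySem.Dict.insert d ln i
  let tb := tb ++ [cur]
  let cur := if PySem.Str.startswith (PySem.Str.strip ln) "type " then pvSplitSecond ln else cur
  (d, tb, cur, i + 1)

def pvPre (lines : List String) : PySem.Dict String Nat × List String :=
  let st := lines.foldl pvPreStep (PySem.Dict.empty, [], "", 0)
  (st.1, st.2.1)

-- type_before[first_idx[ln]] (both lookups total in B's pass; defaults unreachable)
def pvTypeWordB (d : PySem.Dict String Nat) (tb : List String) (ln : String) : String :=
  match PySem.Dict.get? d ln with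
  | some i => (PySem.List.pyGet? tb (i : Int)).getD ""
  | none => ""

def pvWrapB (d : PySem.Dict String Nat) (tb : List String) (sect ln : String) : String :=
  let anchor := pvAnchor ln
  if sect ≠ "#### Generated By" then
    "- " ++ ("<a href=\"#" ++ pvTypeWordB d tb ln ++ "." ++ anchor ++ "\">")
      ++ "`" ++ PySem.Str.slice ln (some 3) none ++ "</a>"
  else
    "- " ++ ("<a href=\"#" ++ anchor ++ "\">")
      ++ "`" ++ PySem.Str.slice ln (some 3) none ++ "</a>"

-- B's loop body; state = (out, machine state 0/1/2, current section); the `continue` of the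
-- state-1 precheck is the inner then-branch, falling through to the shared state-2 block otherwise
def pvStepB (d : PySem.Dict String Nat) (tb : List String) (secs : List String)
    (st : List String × Nat × String) (ln : String) : List String × Nat × String :=
  let (out, state, sect) := st
  let s := PySem.Str.strip ln
  let dash : Unit → List String × Nat × String := fun _ =>
    if PySem.Str.startswith ln "-" then (out ++ [pvWrapB d tb sect ln], 2, sect)
    else if s = "" ∨ PySem.Str.startswith ln "  " then (out ++ [ln], 2, sect)
    else (out ++ [ln], 0, sect)
  if secs.contains s then (out ++ [ln], 1, s)
  else if state = 1 then
    if s = "" ∨ ¬ PySem.Str.startswith (PySem.Str.lstrip ln) "-" then (out ++ [ln], 1, sect)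
    else dash ()
  else if state = 2 then dash ()
  else (out ++ [ln], state, sect)

def add_anchor_tags_alt (content : String) (sections_to_process : List String) : String :=
  let lines := (PySem.Str.split? content "\n").getD []
  let pre := pvPre lines
  let fin := lines.foldl (pvStepB pre.1 pre.2 sections_to_process) ([], 0, "")
  PySem.Str.join "\n" fin.1

-- ===== PRECONDITION & SPEC =====
def Spec_add_anchor_tags (content : String) (sections_to_process : List String) (out : String) : Prop := out = add_anchor_tags_alt content sections_to_process
instance (content : String) (sections_to_process : List String) (out : String) : Decidable (Spec_add_anchor_tags content sections_to_process out) := by unfold Spec_add_anchor_tags; infer_instance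

-- ===== CLAIM (what is proved, stated in full; the proofs are below) =====
def Claim_equal_add_anchor_tags : Prop := ∀ (content : String) (sections_to_process : List String), Dom_add_anchor_tags content sections_to_process → Spec_add_anchor_tags content sections_to_process (add_anchor_tags content sections_to_process)

-- ===== LEMMAS AND PROOFS =====

-- invariant of B's precomputation pass over a processed prefix `pre`
lemma pvPre_inv (pre : List String) :
    let st := pre.foldl pvPreStep (PySem.Dict.empty, [], "", 0)
    (∀ s, PySem.Dict.get? st.1 s = PySem.List.index? pre s) ∧
    st.2.1.length = pre.length ∧
    (∀ k, k < pre.length → st.2.1[k]? = some (pvTypeScan (pre.take k).reverse)) ∧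
    st.2.2.1 = pvTypeScan pre.reverse ∧
    st.2.2.2 = pre.length := by
  induction pre using List.reverseRecOn with
  | nil =>
    refine ⟨fun s => ?_, rfl, fun k hk => by simp at hk, rfl, rfl⟩
    simp [PySem.Dict.get?_empty, PySem.List.index?]
  | append_singleton pre x ih =>
    obtain ⟨hd, hlen, htb, hcur, hn⟩ := ih
    rw [List.foldl_append]
    simp only [List.foldl_cons, List.foldl_nil]
    set st := pre.foldl pvPreStep (PySem.Dict.empty, [], "", 0) with hst
    obtain ⟨d, tb, cur, i⟩ := st
    simp only at hd hlen htb hcur hn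
    subst hcur hn
    refine ⟨?_, ?_, ?_, ?_, ?_⟩
    · -- dict lookup = first-occurrence index
      intro s
      simp only [pvPreStep]
      by_cases hx : x ∈ pre
      · have : (PySem.Dict.get? d x).isSome := by
          rw [hd x, PySem.List.index?_isSome_iff]; exact hx
        simp only [this, if_pos]
        by_cases hs : s ∈ pre
        · rw [hd s, PySem.List.index?_append_of_mem _ hs]
        · rw [hd s]
          rw [(PySem.List.index?_eq_none_iff _ _).mpr hs,
              (PySem.List.index?_eq_none_iff _ _).mpr (by
                simp only [List.mem_append, List.mem_singleton]
                rintro (h | rfl) <;> [exact hs h; exact hs hx])]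
      · have hns : PySem.Dict.get? d x = none := by
          rw [hd x]; exact (PySem.List.index?_eq_none_iff _ _).mpr hx
        rw [if_neg (by simp [hns])]
        rw [PySem.Dict.get?_insert]
        by_cases hsx : s = x
        · subst hsx
          rw [if_pos rfl, PySem.List.index?_append_singleton_self pre s hx]
        · rw [if_neg hsx, hd s]
          by_cases hs : s ∈ pre
          · rw [PySem.List.index?_append_of_mem _ hs]
          · rw [(PySem.List.index?_eq_none_iff _ _).mpr hs,
                (PySem.List.index?_eq_none_iff _ _).mpr (by
                  simp only [List.mem_append, List.mem_singleton]
                  rintro (h | rfl) <;> [exact hs h; exact hsx rfl])]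
    · simp [pvPreStep, hlen]
    · -- prefix array entries
      intro k hk
      simp only [pvPreStep, List.length_append, List.length_singleton] at hk ⊢
      by_cases hklt : k < pre.length
      · rw [List.getElem?_append_left (by omega : k < tb.length),
            List.take_append_of_le_length (by omega), htb k hklt]
      · have hke : k = pre.length := by omega
        subst hke
        rw [List.getElem?_append_right (by omega), hlen]
        simp [List.take_append_of_le_length (le_refl pre.length)]
    · -- running value = scan of the whole reversed prefix
      simp only [pvPreStep, List.reverse_append, List.reverse_singleton, List.singleton_append]
      rw [pvTypeScan]
    · simp [pvPreStep]

-- the type words agree for every line that occurs in `lines`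
lemma typeWord_eq (lines : List String) (ln : String) (h : ln ∈ lines) :
    pvTypeWordA lines ln = pvTypeWordB (pvPre lines).1 (pvPre lines).2 ln := by
  obtain ⟨hd, hlen, htb, -, -⟩ := pvPre_inv lines
  have hsome : (PySem.List.index? lines ln).isSome :=
    (PySem.List.index?_isSome_iff _ _).mpr h
  obtain ⟨k, hk⟩ := Option.isSome_iff_exists.mp hsome
  obtain ⟨hklt, -, -⟩ := PySem.List.getElem_of_index?_eq_some hk
  simp only [pvTypeWordA, pvTypeWordB, pvPre]
  rw [hk, hd ln, hk]
  simp only [PySem.List.pyGet?_natCast, htb k hklt, PySem.List.slice_to_natCast,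
    Option.getD_some]

lemma wrap_eq (lines : List String) (m ln : String) (h : ln ∈ lines) :
    pvWrapA lines m ln = pvWrapB (pvPre lines).1 (pvPre lines).2 m ln := by
  unfold pvWrapA pvWrapB
  rw [typeWord_eq lines ln h]

-- relation between A's (processing, found_first_dash) and B's numeric state
def pvRel (p ffd : Bool) (n : Nat) : Prop :=
  (p = false ∧ n = 0) ∨ (p = true ∧ ffd = false ∧ n = 1) ∨ (p = true ∧ ffd = true ∧ n = 2)

lemma loop_eq (lines secs : List String) :
    ∀ (suf : List String), (∀ x ∈ suf, x ∈ lines) →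
    ∀ (out : List String) (p ffd : Bool) (m : String) (n : Nat), pvRel p ffd n →
    (suf.foldl (pvStepA lines secs) (out, p, ffd, m)).1 =
    (suf.foldl (pvStepB (pvPre lines).1 (pvPre lines).2 secs) (out, n, m)).1 := by
  intro suf
  induction suf with
  | nil => intro _ out p ffd m n _; rfl
  | cons ln suf ih =>
    intro hsuf out p ffd m n hrel
    have hln : ln ∈ lines := hsuf ln (by simp)
    have hsuf' : ∀ x ∈ suf, x ∈ lines := fun x hx => hsuf x (by simp [hx])
    have hwrap := wrap_eq lines m ln hln
    simp only [List.foldl_cons, pvStepA, pvStepB]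
    by_cases hc : secs.contains (PySem.Str.strip ln) = true
    · rw [if_pos hc, if_pos hc]
      exact ih hsuf' _ _ _ _ _ (Or.inr (Or.inl ⟨rfl, rfl, rfl⟩))
    · rw [if_neg hc, if_neg hc]
      rcases hrel with ⟨hp, hn⟩ | ⟨hp, hf, hn⟩ | ⟨hp, hf, hn⟩ <;> subst hp hn <;>
        [skip; subst hf; subst hf]
      · -- idle: A not processing, B state 0
        rw [if_neg Bool.false_ne_true, if_neg (by decide : ¬(0 = 1)),
            if_neg (by decide : ¬(0 = 2))]
        exact ih hsuf' _ _ _ _ _ (Or.inl ⟨rfl, rfl⟩)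
      · -- in section, before the first dash: A (true, false), B state 1
        rw [if_pos rfl, if_pos (rfl : (1 : Nat) = 1)]
        by_cases h1 : PySem.Str.strip ln = ""
        · rw [if_pos ⟨Bool.false_ne_true, h1⟩, if_pos (Or.inl h1)]
          exact ih hsuf' _ _ _ _ _ (Or.inr (Or.inl ⟨rfl, rfl, rfl⟩))
        · by_cases h2 : PySem.Str.startswith (PySem.Str.lstrip ln) "-" = true
          · -- first dash found: fall through to the dash block
            rw [if_neg (fun h => h1 h.2), if_neg (fun h => h.2 h2),
                if_neg (fun h : PySem.Str.strip ln = "" ∨ ¬PySem.Str.startswith (PySem.Str.lstrip ln) "-" = true => h.elim h1 (fun hn => hn h2))]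
            by_cases h3 : PySem.Str.startswith ln "-" = true
            · rw [if_pos h3, if_pos h3, hwrap]
              exact ih hsuf' _ _ _ _ _ (Or.inr (Or.inr ⟨rfl, rfl, rfl⟩))
            · rw [if_neg h3, if_neg h3]
              by_cases h4 : PySem.Str.startswith ln "  " = true
              · rw [if_pos (Or.inr h4), if_pos (Or.inr h4)]
                exact ih hsuf' _ _ _ _ _ (Or.inr (Or.inr ⟨rfl, rfl, rfl⟩))
              · rw [if_neg (fun h : PySem.Str.strip ln = "" ∨ PySem.Str.startswith ln "  " = true => h.elim h1 h4), if_neg (fun h : PySem.Str.strip ln = "" ∨ PySem.Str.startswith ln "  " = true => h.elim h1 h4)]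
                exact ih hsuf' _ _ _ _ _ (Or.inl ⟨rfl, rfl⟩)
          · rw [if_neg (fun h => h1 h.2), if_pos ⟨Bool.false_ne_true, h2⟩,
                if_pos (Or.inr h2)]
            exact ih hsuf' _ _ _ _ _ (Or.inr (Or.inl ⟨rfl, rfl, rfl⟩))
      · -- wrapping dash lines: A (true, true), B state 2
        rw [if_pos rfl, if_neg (fun (h : ¬(true = true) ∧ _) => h.1 rfl),
            if_neg (fun (h : ¬(true = true) ∧ _) => h.1 rfl),
            if_neg (by decide : ¬(2 = 1)), if_pos (rfl : (2 : Nat) = 2)]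
        by_cases h3 : PySem.Str.startswith ln "-" = true
        · rw [if_pos h3, if_pos h3, hwrap]
          exact ih hsuf' _ _ _ _ _ (Or.inr (Or.inr ⟨rfl, rfl, rfl⟩))
        · rw [if_neg h3, if_neg h3]
          by_cases h1 : PySem.Str.strip ln = ""
          · rw [if_pos (Or.inl h1), if_pos (Or.inl h1)]
            exact ih hsuf' _ _ _ _ _ (Or.inr (Or.inr ⟨rfl, rfl, rfl⟩))
          · by_cases h4 : PySem.Str.startswith ln "  " = true
            · rw [if_pos (Or.inr h4), if_pos (Or.inr h4)]
              exact ih hsuf' _ _ _ _ _ (Or.inr (Or.inr ⟨rfl, rfl, rfl⟩))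
            · rw [if_neg (fun h : PySem.Str.strip ln = "" ∨ PySem.Str.startswith ln "  " = true => h.elim h1 h4), if_neg (fun h : PySem.Str.strip ln = "" ∨ PySem.Str.startswith ln "  " = true => h.elim h1 h4)]
              exact ih hsuf' _ _ _ _ _ (Or.inl ⟨rfl, rfl⟩)

-- ===== VERDICT (by name: the statement is the Claim_ definition above) =====
theorem add_anchor_tags_spec : Claim_equal_add_anchor_tags := by
  intro content secs _
  show _ = _
  unfold add_anchor_tags add_anchor_tags_alt
  have := loop_eq ((PySem.Str.split? content "\n").getD []) secs ((PySem.Str.split? content "\n").getD [])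
    (fun x hx => hx) [] false false "" 0 (Or.inl ⟨rfl, rfl⟩)
  simp only [this]
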